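-- pv_equiv track=rewrite | github.com/decorJim/pythonpractice | capOneSlidingWindow/capOneSlidingWindow.py | solution
-- ===== SOURCE A (Python) =====
-- def solution(salesData, frequencyThreshold):
--
--     i = 0
--     j = 0
--
--     frequencies = {}
--
--     maxLen = 0
--
--     while j < len(salesData):
--
--         if salesData[j] in frequencies:
--             frequencies[ salesData[j] ] += 1
--
--         else:
--             frequencies[ salesData[j] ] = 1
--
--
--         # map keep tracks of consecutive continuous number
--         # if the frequencyThreshold then move the left pointer until all frequencies are lower
--         while any(frequency > frequencyThreshold for frequency in frequencies.values()):
--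
--             # by moving left pointer we are no longer including the far left frequency
--             #  1:3  <- the i now points to the second 1 so reduce frequency to 2
--             #  2:2
--             #  3:2
--             frequencies[salesData[i]] -= 1
--
--             if frequencies[salesData[i]] == 0:
--                 del frequencies[salesData[i]]
--
--             i += 1
--
--         maxLen = max(maxLen, j - i + 1)
--
--         j += 1
--
--     return maxLen
-- ===== SOURCE B (Python) =====
-- def solution(salesData, frequencyThreshold):
--     # no non-empty window is valid for a non-positive threshold
--     if frequencyThreshold <= 0:
--         return 0
--     positions = {}   # value -> list of all its occurrence indices so far
--     left = 0
--     maxLen = 0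
--     for j, x in enumerate(salesData):
--         occ = positions.setdefault(x, [])
--         occ.append(j)
--         if len(occ) > frequencyThreshold:
--             # window must start after the (len(occ)-threshold)-th occurrence of x
--             cut = occ[len(occ) - frequencyThreshold - 1] + 1
--             if cut > left:
--                 left = cut
--         if j - left + 1 > maxLen:
--             maxLen = j - left + 1
--     return maxLen
-- ===== Notes on version B (the rewrite author's own statement) =====
-- stated objective: faster
-- what changed: Replaced A's shrink-loop over a frequency dictionary (which decrements counts one step at a time and rescans all values with any()) by an occurrence-index algorithm: B keeps, per value, the list of its occurrence positions and, when the new element's occurrence count exceeds the threshold, jumps the left boundary directly past the (count-threshold)-th occurrence by a single list indexing - there is no inner loop, no count decrementing and no dictionary deletion; non-positive thresholds return 0 up front.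
import Mathlib
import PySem

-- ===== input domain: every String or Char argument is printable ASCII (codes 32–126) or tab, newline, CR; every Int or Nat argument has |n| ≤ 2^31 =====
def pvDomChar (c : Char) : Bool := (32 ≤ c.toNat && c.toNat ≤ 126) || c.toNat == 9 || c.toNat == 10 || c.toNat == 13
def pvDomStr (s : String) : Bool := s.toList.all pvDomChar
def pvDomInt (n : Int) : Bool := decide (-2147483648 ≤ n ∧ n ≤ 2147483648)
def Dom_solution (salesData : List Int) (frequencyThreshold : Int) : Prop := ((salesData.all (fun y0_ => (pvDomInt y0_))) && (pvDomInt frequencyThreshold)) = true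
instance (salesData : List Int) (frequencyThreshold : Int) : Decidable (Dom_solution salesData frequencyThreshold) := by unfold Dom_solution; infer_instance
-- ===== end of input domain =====

-- B replaces A's dictionary shrink-loop (decrement counts one step at a time, rescanning all
-- values with any()) by per-value occurrence-position lists: the left boundary jumps directly
-- past the (count-threshold)-th occurrence of the just-added element by one list indexing.


-- ===== PORT A =====
-- inner while loop of A: `while any(frequency > T for frequency in frequencies.values()): …`
-- (fuel only makes the recursion total; `.getD 0` guards the IndexError branch Python never reaches)
def innerA (sd : List Int) (T : Int) : Nat → Int → PySem.Dict Int Int → Int × PySem.Dict Int Int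
  | 0, i, d => (i, d)
  | fuel+1, i, d =>
    if d.values.any (fun v => decide (v > T)) then
      let y := (PySem.List.pyGet? sd i).getD 0
      let c := d.getD y 0 - 1
      let d' := d.insert y c
      let d'' := if c == 0 then d'.erase y else d'
      innerA sd T fuel (i + 1) d''
    else (i, d)

-- outer while loop of A: `while j < len(salesData): …`
def loopA (sd : List Int) (T : Int) : Nat → Int → Int → PySem.Dict Int Int → Int → Int
  | 0, _, _, _, maxLen => maxLen
  | fuel+1, i, j, d, maxLen =>
    if j < (sd.length : Int) then
      let x := (PySem.List.pyGet? sd j).getD 0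
      let d1 := if d.contains x then d.insert x (d.getD x 0 + 1) else d.insert x 1
      let p := innerA sd T (sd.length + 1) i d1
      let maxLen' := max maxLen (j - p.1 + 1)
      loopA sd T fuel p.1 (j + 1) p.2 maxLen'
    else maxLen

def solution (salesData : List Int) (frequencyThreshold : Int) : Int :=
  loopA salesData frequencyThreshold (salesData.length + 1) 0 0 PySem.Dict.empty 0

-- ===== PORT B =====
-- `for j, x in enumerate(salesData): …` over B's occurrence-position dictionary;
-- `occ[len(occ)-T-1]` is ported as pyGet? with `.getD 0` guarding the branch Python never reaches
def loopB (T : Int) : List (Int × Nat) → PySem.Dict Int (List Int) → Int → Int → Int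
  | [], _, _, maxLen => maxLen
  | (x, j) :: rest, pos, left, maxLen =>
    let occ' := pos.getD x [] ++ [(j : Int)]
    let pos' := pos.insert x occ'
    let left' :=
      if ((occ'.length : Int) > T) then
        let cut := (PySem.List.pyGet? occ' ((occ'.length : Int) - T - 1)).getD 0 + 1
        if cut > left then cut else left
      else left
    let maxLen' := if (j : Int) - left' + 1 > maxLen then (j : Int) - left' + 1 else maxLen
    loopB T rest pos' left' maxLen'

def solution_alt (salesData : List Int) (frequencyThreshold : Int) : Int :=
  if frequencyThreshold ≤ 0 then 0
  else loopB frequencyThreshold salesData.zipIdx PySem.Dict.empty 0 0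

-- ===== PRECONDITION & SPEC =====
def Spec_solution (salesData : List Int) (frequencyThreshold : Int) (out : Int) : Prop := out = solution_alt salesData frequencyThreshold
instance (salesData : List Int) (frequencyThreshold : Int) (out : Int) : Decidable (Spec_solution salesData frequencyThreshold out) := by unfold Spec_solution; infer_instance

-- ===== CLAIM (what is proved, stated in full; the proofs are below) =====
def Claim_equal_solution : Prop := ∀ (salesData : List Int) (frequencyThreshold : Int), Dom_solution salesData frequencyThreshold → Spec_solution salesData frequencyThreshold (solution salesData frequencyThreshold)

-- ===== LEMMAS AND PROOFS =====

-- `erase` facts (no PySem lemmas exist for erase; proved here on the items list)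
theorem find?_filterOut_self (l : List (Int × Int)) (k : Int) :
    (l.filter (fun p => !(p.1 == k))).find? (fun p => p.1 == k) = none := by
  induction l with
  | nil => rfl
  | cons a l ih =>
    by_cases h : a.1 = k
    · simp [h, ih]
    · simp [h, ih]

theorem find?_filterOut_ne (l : List (Int × Int)) (k k' : Int) (h : k' ≠ k) :
    (l.filter (fun p => !(p.1 == k))).find? (fun p => p.1 == k') = l.find? (fun p => p.1 == k') := by
  induction l with
  | nil => rfl
  | cons a l ih =>
    by_cases ha : a.1 = k
    · have hne : k ≠ k' := Ne.symm h
      simp [ha, hne, ih]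
    · by_cases hb : a.1 = k'
      · simp [hb, h]
      · simp [ha, hb, ih]

theorem dict_get?_erase (d : PySem.Dict Int Int) (k k' : Int) :
    (d.erase k).get? k' = if k' = k then none else d.get? k' := by
  unfold PySem.Dict.erase PySem.Dict.get?
  by_cases h : k' = k
  · simp only [h, if_pos]
    rw [find?_filterOut_self d.items k]
    rfl
  · simp [h, find?_filterOut_ne d.items k k' h]

theorem dict_nodup_keys_erase (d : PySem.Dict Int Int) (k : Int) (h : d.keys.Nodup) :
    (d.erase k).keys.Nodup := by
  have hsub : ((d.erase k).keys).Sublist d.keys := by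
    unfold PySem.Dict.erase PySem.Dict.keys
    exact List.Sublist.map _ List.filter_sublist
  exact h.sublist hsub

-- the invariant: d behaves as the multiset of the current window W
def WInv (W : List Int) (d : PySem.Dict Int Int) : Prop :=
  d.keys.Nodup ∧ ∀ k : Int, d.get? k = if W.count k = 0 then none else some ((W.count k : Int))

theorem WInv_getD {W : List Int} {d : PySem.Dict Int Int} (h : WInv W d) (k : Int) :
    d.getD k 0 = (W.count k : Int) := by
  rw [PySem.Dict.getD_eq_get?_getD, h.2 k]
  by_cases hc : W.count k = 0 <;> simp [hc]

-- condition equivalence: after adding x, only x's count can exceed T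
theorem cond_equiv {W : List Int} {d : PySem.Dict Int Int} {T x : Int} (hT : 0 < T)
    (hinv : WInv W d) (hside : ∀ k : Int, k ≠ x → (W.count k : Int) ≤ T) :
    (d.values.any (fun v => decide (v > T)) = true) ↔ (W.count x : Int) > T := by
  constructor
  · intro hany
    rcases List.any_eq_true.mp hany with ⟨v, hv, hvT⟩
    rw [PySem.Dict.values_eq_map_keys d hinv.1 0] at hv
    rcases List.mem_map.mp hv with ⟨k, hk, rfl⟩
    have hvT' := of_decide_eq_true hvT
    rw [WInv_getD hinv k] at hvT'
    by_cases hkx : k = x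
    · subst hkx; exact hvT'
    · exact absurd hvT' (not_lt.mpr (hside k hkx))
  · intro hx
    have hcnt : W.count x ≠ 0 := by
      intro h0; rw [h0] at hx; simp at hx; omega
    have hmem : x ∈ d.keys := by
      by_contra hnm
      have := (PySem.Dict.get?_eq_none_iff_not_mem_keys d x).mpr hnm
      rw [hinv.2 x] at this
      simp [hcnt] at this
    refine List.any_eq_true.mpr ⟨(W.count x : Int), ?_, by simpa using hx⟩
    rw [PySem.Dict.values_eq_map_keys d hinv.1 0]
    exact List.mem_map.mpr ⟨x, hmem, WInv_getD hinv x⟩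

-- one shrink step preserves the invariant, for the window with its head removed
theorem WInv_dec {W' : List Int} {d : PySem.Dict Int Int} {y : Int} (hinv : WInv (y :: W') d) :
    WInv W' (let c := d.getD y 0 - 1;
            let d' := d.insert y c;
            if c == 0 then d'.erase y else d') := by
  have hc : d.getD y 0 - 1 = (W'.count y : Int) := by
    rw [WInv_getD hinv y]; simp
  constructor
  · simp only []
    split
    · exact dict_nodup_keys_erase _ y (PySem.Dict.nodup_keys_insert d y _ hinv.1)
    · exact PySem.Dict.nodup_keys_insert d y _ hinv.1
  · intro k
    simp only []
    have hcount : ∀ k : Int, k ≠ y → (y :: W').count k = W'.count k := by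
      intro k hk
      have h2 : ¬ (y = k) := fun hh => hk hh.symm
      simp [h2]
    split
    · next h0 =>
      rw [dict_get?_erase]
      by_cases hky : k = y
      · subst hky
        have : W'.count k = 0 := by
          have := beq_iff_eq.mp h0; omega
        simp [this]
      · rw [if_neg hky, PySem.Dict.get?_insert, if_neg hky, hinv.2 k, hcount k hky]
    · next h0 =>
      rw [PySem.Dict.get?_insert]
      by_cases hky : k = y
      · subst hky
        have hne : W'.count k ≠ 0 := by
          intro hz
          apply h0; rw [hc, hz]; simp
        simp [hne, hc]
      · rw [if_neg hky, hinv.2 k, hcount k hky]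

-- closed form for A's inner loop: it leaves the state alone when x's count is within the
-- threshold, and otherwise drops the window up to and including the first occurrence of x
theorem innerA_run (sd : List Int) (T x : Int) (hT : 0 < T) (R : List Int) :
    ∀ (fuel : Nat) (W : List Int) (i : Int) (d : PySem.Dict Int Int),
      W.length < fuel → 0 ≤ i → sd.drop i.toNat = W ++ R →
      WInv W d → (∀ k : Int, k ≠ x → (W.count k : Int) ≤ T) →
      (((W.count x : Int) ≤ T → innerA sd T fuel i d = (i, d)) ∧
       ((W.count x : Int) = T + 1 →
         (innerA sd T fuel i d).1 = i + (W.idxOf x : Int) + 1 ∧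
         sd.drop (innerA sd T fuel i d).1.toNat = (W.drop (W.idxOf x + 1)) ++ R ∧
         WInv (W.drop (W.idxOf x + 1)) (innerA sd T fuel i d).2 ∧
         (∀ k : Int, ((W.drop (W.idxOf x + 1)).count k : Int) ≤ T))) := by
  intro fuel
  induction fuel with
  | zero => intro W i d hfuel; exact (Nat.not_lt_zero _ hfuel).elim
  | succ fuel ih =>
    intro W i d hfuel hi hdrop hinv hside
    have hcond := cond_equiv hT hinv hside
    constructor
    · -- within threshold: the loop condition is false, state unchanged
      intro hle
      have hcA : ¬ (d.values.any (fun v => decide (v > T)) = true) := by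
        intro h; have := hcond.mp h; omega
      rw [innerA, if_neg hcA]
    · -- count x = T + 1: one step removes the head, recurse
      intro heq
      have hcA : d.values.any (fun v => decide (v > T)) = true := hcond.mpr (by omega)
      have hxW : x ∈ W := by
        have hne : W.count x ≠ 0 := by intro h0; rw [h0] at heq; simp at heq; omega
        exact List.count_pos_iff.mp (Nat.pos_of_ne_zero hne)
      have hWne : W ≠ [] := List.ne_nil_of_mem hxW
      obtain ⟨w0, W1, rfl⟩ := List.exists_cons_of_ne_nil hWne
      have hy : (PySem.List.pyGet? sd i).getD 0 = w0 := by
        have h1 : i = ((i.toNat : Nat) : Int) := by omega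
        rw [h1, PySem.List.pyGet?_natCast]
        have : sd[i.toNat]? = (sd.drop i.toNat)[0]? := by
          rw [List.getElem?_drop]; simp
        rw [this, hdrop]; rfl
      have hinv' := WInv_dec (W' := W1) (d := d) (y := w0) hinv
      have hdrop' : sd.drop (i + 1).toNat = W1 ++ R := by
        have h1 : (i + 1).toNat = i.toNat + 1 := by omega
        rw [h1, ← List.drop_drop, hdrop]
        simp
      have hside' : ∀ k : Int, k ≠ x → (W1.count k : Int) ≤ T := by
        intro k hk
        have := hside k hk
        simp [List.count_cons] at this ⊢
        omega
      have hstep : innerA sd T (fuel + 1) i d = innerA sd T fuel (i + 1)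
          (let c := d.getD w0 0 - 1;
           let d' := d.insert w0 c;
           if c == 0 then d'.erase w0 else d') := by
        rw [innerA, if_pos hcA, hy]
      have hrec := ih W1 (i + 1) _ (by simp at hfuel ⊢; omega) (by omega) hdrop' hinv' hside'
      by_cases hw0 : w0 = x
      · -- head is x: its count drops to T, recursion exits immediately
        have hc1 : (W1.count x : Int) = T := by
          have : (w0 :: W1).count x = W1.count x + 1 := by simp [hw0]
          rw [this] at heq; push_cast at heq ⊢; omega
        have hdone := hrec.1 (le_of_eq hc1)
        rw [hstep, hdone]
        have hidx : (w0 :: W1).idxOf x = 0 := by rw [hw0]; exact List.idxOf_cons_self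
        refine ⟨by rw [hidx]; push_cast; ring, ?_, ?_, ?_⟩
        · rw [hidx]; simpa using hdrop'
        · rw [hidx]; simpa using hinv'
        · rw [hidx]
          intro k
          by_cases hk : k = x
          · subst hk; simpa using le_of_eq hc1
          · simpa using hside' k hk
      · -- head is not x: x's count in W1 is still T + 1
        have hc1 : (W1.count x : Int) = T + 1 := by
          have : (w0 :: W1).count x = W1.count x := by
            simp [List.count_cons]
            exact hw0
          rw [this] at heq; exact heq
        have hxW1 : x ∈ W1 := by
          rcases List.mem_cons.mp hxW with h1 | h1
          · exact absurd h1.symm hw0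
          · exact h1
        obtain ⟨h1, h2, h3, h4⟩ := hrec.2 hc1
        have hidx : (w0 :: W1).idxOf x = W1.idxOf x + 1 := by
          rw [List.idxOf_cons_ne _ (by simpa using hw0)]
        rw [hstep]
        refine ⟨?_, ?_, ?_, ?_⟩
        · rw [h1, hidx]; push_cast; ring
        · rw [h2, hidx]; simp
        · rw [hidx]; simpa using h3
        · rw [hidx]; simpa using h4

-- B-side: the list of occurrence positions of x in l, as absolute indices starting at off
def occs (l : List Int) (off : Nat) (x : Int) : List Int :=
  ((l.zipIdx off).filter (fun p => p.1 == x)).map (fun p => ((p.2 : Nat) : Int))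

theorem occs_append (a b : List Int) (off : Nat) (x : Int) :
    occs (a ++ b) off x = occs a off x ++ occs b (off + a.length) x := by
  unfold occs
  rw [List.zipIdx_append, List.filter_append, List.map_append]

theorem occs_length (l : List Int) (off : Nat) (x : Int) :
    (occs l off x).length = l.count x := by
  induction l generalizing off with
  | nil => rfl
  | cons a l ih =>
    unfold occs
    by_cases h : a = x
    · simp [List.zipIdx_cons, h]
      have := ih (off + 1)
      unfold occs at this
      simpa using this
    · simp [List.zipIdx_cons, h]
      have := ih (off + 1)
      unfold occs at this
      simpa using this

theorem occs_mem_range (l : List Int) (off : Nat) (x q : Int) (h : q ∈ occs l off x) :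
    (off : Int) ≤ q ∧ q < (off : Int) + l.length := by
  unfold occs at h
  rcases List.mem_map.mp h with ⟨p, hp, rfl⟩
  have hp' := List.of_mem_filter hp
  have hmem := List.mem_filter.mp hp |>.1
  have := List.mem_zipIdx hmem
  constructor
  · exact_mod_cast this.1
  · have := this.2.1
    omega

theorem occs_head (l : List Int) (off : Nat) (x : Int) (h : x ∈ l) :
    (occs l off x)[0]? = some ((off + l.idxOf x : Nat) : Int) := by
  induction l generalizing off with
  | nil => cases h
  | cons a l ih =>
    by_cases ha : a = x
    · unfold occs
      simp [List.zipIdx_cons, ha, List.idxOf_cons_self]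
    · have hx : x ∈ l := by
        rcases List.mem_cons.mp h with h1 | h1
        · exact absurd h1.symm ha
        · exact h1
      have hstep : occs (a :: l) off x = occs l (off + 1) x := by
        unfold occs
        simp [List.zipIdx_cons, ha]
      rw [hstep, ih (off + 1) hx]
      have : a ≠ x := ha
      rw [List.idxOf_cons_ne _ (by simpa using this)]
      congr 1
      omega

-- B's per-step left-edge update and max update, named so loopB's let-chain can be unfolded by rfl
def bLeft (T : Int) (occ : List Int) (left : Int) : Int :=
  if (occ.length : Int) > T then
    if (PySem.List.pyGet? occ ((occ.length : Int) - T - 1)).getD 0 + 1 > left then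
      (PySem.List.pyGet? occ ((occ.length : Int) - T - 1)).getD 0 + 1
    else left
  else left

def bMax (left maxLen : Int) (j : Nat) : Int :=
  if (j : Int) - left + 1 > maxLen then (j : Int) - left + 1 else maxLen

theorem loopB_cons (T x : Int) (j : Nat) (rest : List (Int × Nat))
    (pos : PySem.Dict Int (List Int)) (left maxLen : Int) :
    loopB T ((x, j) :: rest) pos left maxLen =
      loopB T rest (pos.insert x (pos.getD x [] ++ [(j : Int)]))
        (bLeft T (pos.getD x [] ++ [(j : Int)]) left)
        (bMax (bLeft T (pos.getD x [] ++ [(j : Int)]) left) maxLen j) := rfl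

theorem bMax_eq (left maxLen : Int) (j : Nat) :
    bMax left maxLen j = max maxLen ((j : Int) - left + 1) := by
  unfold bMax; rw [Int.max_def]; split_ifs <;> omega

-- outer loops agree (positive threshold)
theorem outer_agree (sd : List Int) (T : Int) (hT : 0 < T) :
    ∀ (R : List Int) (fuel : Nat) (jn : Nat) (i : Int) (d : PySem.Dict Int Int)
      (pos : PySem.Dict Int (List Int)) (maxLen : Int) (W : List Int),
      R.length < fuel → sd.drop jn = R → 0 ≤ i → i.toNat ≤ jn →
      sd.drop i.toNat = W ++ R → i.toNat + W.length = jn →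
      WInv W d → (∀ k : Int, (W.count k : Int) ≤ T) →
      (∀ y : Int, pos.getD y [] = occs (sd.take jn) 0 y) →
      loopA sd T fuel i (jn : Int) d maxLen = loopB T (R.zipIdx jn) pos i maxLen := by
  intro R
  induction R with
  | nil =>
    intro fuel jn i d pos maxLen W hfuel hdropj hi hile hdrop hlen hinv hcnt hpos
    obtain ⟨f, rfl⟩ : ∃ f, fuel = f + 1 := ⟨fuel - 1, by omega⟩
    have hj : ¬ ((jn : Int) < (sd.length : Int)) := by
      have := List.drop_eq_nil_iff.mp hdropj
      omega
    rw [loopA, if_neg hj]; rfl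
  | cons r R' ihR =>
    intro fuel jn i d pos maxLen W hfuel hdropj hi hile hdrop hlen hinv hcnt hpos
    obtain ⟨f, rfl⟩ : ∃ f, fuel = f + 1 := ⟨fuel - 1, by omega⟩
    have hjlt : jn < sd.length := by
      by_contra h
      rw [List.drop_eq_nil_of_le (by omega)] at hdropj
      exact absurd hdropj (by simp)
    have hj : ((jn : Int) < (sd.length : Int)) := by exact_mod_cast hjlt
    have hx : (PySem.List.pyGet? sd (jn : Int)).getD 0 = r := by
      rw [PySem.List.pyGet?_natCast]
      have : sd[jn]? = (sd.drop jn)[0]? := by rw [List.getElem?_drop]; simp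
      rw [this, hdropj]; rfl
    -- A's two add branches are the same insert
    have hadd : (if d.contains r then d.insert r (d.getD r 0 + 1) else d.insert r 1)
        = d.insert r (d.getD r 0 + 1) := by
      split
      · rfl
      · next h =>
        rw [PySem.Dict.getD_of_not_contains d (k := r) 0 (by simpa using h)]
        norm_num
    -- invariant for the grown window
    have hinv1 : WInv (W ++ [r]) (d.insert r (d.getD r 0 + 1)) := by
      constructor
      · exact PySem.Dict.nodup_keys_insert d r _ hinv.1
      · intro k
        rw [PySem.Dict.get?_insert]
        by_cases hk : k = r
        · subst hk
          rw [if_pos rfl, WInv_getD hinv k]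
          have : (W ++ [k]).count k = W.count k + 1 := by
            simp [List.count_append]
          rw [this]
          simp
        · rw [if_neg hk, hinv.2 k]
          have : (W ++ [r]).count k = W.count k := by
            simp [List.count_append, Ne.symm hk]
          rw [this]
    have hside1 : ∀ k : Int, k ≠ r → ((W ++ [r]).count k : Int) ≤ T := by
      intro k hk
      have : (W ++ [r]).count k = W.count k := by
        simp [List.count_append, Ne.symm hk]
      rw [this]; exact hcnt k
    have hcnt1 : ((W ++ [r]).count r : Int) ≤ T + 1 := by
      have h1 := hcnt r
      have h2 : (W ++ [r]).count r = W.count r + 1 := by simp [List.count_append]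
      rw [h2]; push_cast; omega
    have hdrop1 : sd.drop i.toNat = (W ++ [r]) ++ R' := by rw [hdrop]; simp
    have hfuel1 : (W ++ [r]).length < sd.length + 1 := by simp; omega
    have hrun := innerA_run sd T r hT R' (sd.length + 1) (W ++ [r]) i
      (d.insert r (d.getD r 0 + 1)) hfuel1 hi hdrop1 hinv1 hside1
    -- occurrence bookkeeping
    have hPlen : (sd.take i.toNat).length = i.toNat := by simp; omega
    have hjnlen : (sd.take jn).length = jn := by simp; omega
    have htakejn : sd.take jn = sd.take i.toNat ++ W := by
      rw [← hlen, List.take_add, hdrop, List.take_left]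
    have htakejn1 : sd.take (jn + 1) = sd.take jn ++ [r] := by
      rw [List.take_add_one]
      have h0 : sd[jn]? = (sd.drop jn)[0]? := by rw [List.getElem?_drop]; simp
      rw [h0, hdropj]
      rfl
    have hsingleton : ∀ (off : Nat) (y : Int), occs [y] off y = [(off : Int)] := by
      intro off y; simp [occs, List.zipIdx_cons]
    have hsingleton_ne : ∀ (off : Nat) (y z : Int), z ≠ y → occs [y] off z = [] := by
      intro off y z hzy
      simp only [occs, List.zipIdx_cons, List.zipIdx_nil, List.filter]
      have : (y == z) = false := by simp; exact fun h => hzy h.symm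
      simp [this]
    have hoccW : occs (sd.take jn) 0 r = occs (sd.take i.toNat) 0 r ++ occs W i.toNat r := by
      rw [htakejn, occs_append, hPlen, Nat.zero_add]
    have hocc' : pos.getD r [] ++ [((jn : Nat) : Int)]
        = occs (sd.take i.toNat) 0 r ++ occs (W ++ [r]) i.toNat r := by
      rw [hpos r, hoccW, List.append_assoc, occs_append, hsingleton, hlen]
    have hlenA : (occs (sd.take i.toNat) 0 r).length = (sd.take i.toNat).count r :=
      occs_length _ _ _
    have hlenB : (occs (W ++ [r]) i.toNat r).length = (W ++ [r]).count r :=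
      occs_length _ _ _
    have hmemB : r ∈ W ++ [r] := by simp
    -- the updated position dictionary still records all occurrences
    have hpos' : ∀ y : Int, (pos.insert r (pos.getD r [] ++ [((jn : Nat) : Int)])).getD y []
        = occs (sd.take (jn + 1)) 0 y := by
      intro y
      rw [PySem.Dict.getD_insert, htakejn1, occs_append, Nat.zero_add, hjnlen]
      by_cases hy : y = r
      · subst hy
        rw [if_pos rfl, hsingleton, hpos y]
      · rw [if_neg hy, hsingleton_ne _ _ _ hy, List.append_nil, hpos y]
    have hzip : (r :: R').zipIdx jn = (r, jn) :: R'.zipIdx (jn + 1) := List.zipIdx_cons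
    have hcast : ((jn : Int) + 1) = (((jn + 1 : Nat) : Int)) := by push_cast; ring
    by_cases hwle : ((W ++ [r]).count r : Int) ≤ T
    · -- x's count stays within the threshold: A's inner loop is a no-op, B keeps its left edge
      have hA := hrun.1 hwle
      have hbLeft : bLeft T (pos.getD r [] ++ [((jn : Nat) : Int)]) i = i := by
        unfold bLeft
        rw [hocc']
        by_cases hcgt : (((occs (sd.take i.toNat) 0 r ++ occs (W ++ [r]) i.toNat r).length : Int) > T)
        · rw [if_pos hcgt]
          have hw : ((occs (W ++ [r]) i.toNat r).length : Int) ≤ T := by rw [hlenB]; exact hwle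
          have hnn : 0 ≤ ((occs (sd.take i.toNat) 0 r ++ occs (W ++ [r]) i.toNat r).length : Int) - T - 1 := by
            omega
          obtain ⟨m, hm⟩ : ∃ m : Nat,
              ((occs (sd.take i.toNat) 0 r ++ occs (W ++ [r]) i.toNat r).length : Int) - T - 1 = (m : Int) :=
            ⟨_, (Int.toNat_of_nonneg hnn).symm⟩
          have hmlt : m < (occs (sd.take i.toNat) 0 r).length := by
            rw [List.length_append] at hcgt hm
            push_cast at hcgt hm
            omega
          rw [hm, PySem.List.pyGet?_natCast, List.getElem?_append_left hmlt,
            List.getElem?_eq_getElem hmlt]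
          simp only [Option.getD_some]
          have hq := occs_mem_range (sd.take i.toNat) 0 r _ (List.getElem_mem hmlt)
          rw [hPlen] at hq
          rw [if_neg (by omega)]
        · rw [if_neg hcgt]
      rw [loopA, if_pos hj, hzip, loopB_cons]
      simp only [hx, hadd, hA, hbLeft, bMax_eq, hcast]
      exact ihR f (jn + 1) i (d.insert r (d.getD r 0 + 1))
        (pos.insert r (pos.getD r [] ++ [((jn : Nat) : Int)]))
        (max maxLen (((jn : Nat) : Int) - i + 1)) (W ++ [r])
        (by simp at hfuel ⊢; omega)
        (by rw [← List.drop_drop, hdropj]; rfl)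
        hi (by omega) hdrop1 (by simp; omega) hinv1
        (fun k => by by_cases hk : k = r
                     · subst hk; exact hwle
                     · exact hside1 k hk)
        hpos'
    · -- x's count reached T + 1: A's inner loop jumps past x's first occurrence, so does B
      have heq : ((W ++ [r]).count r : Int) = T + 1 := by omega
      obtain ⟨hA1, hA2, hA3, hA4⟩ := hrun.2 heq
      have hidxlt : (W ++ [r]).idxOf r < (W ++ [r]).length := List.idxOf_lt_length_of_mem hmemB
      have hbLeft : bLeft T (pos.getD r [] ++ [((jn : Nat) : Int)]) i
          = i + (((W ++ [r]).idxOf r : Nat) : Int) + 1 := by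
        unfold bLeft
        rw [hocc']
        have hw : ((occs (W ++ [r]) i.toNat r).length : Int) = T + 1 := by rw [hlenB]; exact heq
        have hcgt : (((occs (sd.take i.toNat) 0 r ++ occs (W ++ [r]) i.toNat r).length : Int) > T) := by
          rw [List.length_append]; push_cast; omega
        rw [if_pos hcgt]
        have hidxeq : ((occs (sd.take i.toNat) 0 r ++ occs (W ++ [r]) i.toNat r).length : Int) - T - 1
            = (((occs (sd.take i.toNat) 0 r).length : Nat) : Int) := by
          rw [List.length_append]; push_cast; omega
        rw [hidxeq, PySem.List.pyGet?_natCast, List.getElem?_append_right (le_refl _)]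
        simp only [Nat.sub_self]
        rw [occs_head (W ++ [r]) i.toNat r hmemB]
        simp only [Option.getD_some]
        rw [if_pos (by push_cast; omega)]
        push_cast
        omega
      have hi' : (0 : Int) ≤ i + (((W ++ [r]).idxOf r : Nat) : Int) + 1 := by omega
      have hiN : (i + (((W ++ [r]).idxOf r : Nat) : Int) + 1).toNat
          = i.toNat + (W ++ [r]).idxOf r + 1 := by omega
      rw [hA1] at hA2
      rw [loopA, if_pos hj, hzip, loopB_cons]
      simp only [hx, hadd, hA1, hbLeft, bMax_eq, hcast]
      exact ihR f (jn + 1) (i + (((W ++ [r]).idxOf r : Nat) : Int) + 1)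
        (innerA sd T (sd.length + 1) i (d.insert r (d.getD r 0 + 1))).2
        (pos.insert r (pos.getD r [] ++ [((jn : Nat) : Int)]))
        (max maxLen (((jn : Nat) : Int) - (i + (((W ++ [r]).idxOf r : Nat) : Int) + 1) + 1))
        ((W ++ [r]).drop ((W ++ [r]).idxOf r + 1))
        (by simp at hfuel ⊢; omega)
        (by rw [← List.drop_drop, hdropj]; rfl)
        hi'
        (by rw [hiN]; simp at hidxlt ⊢; omega)
        hA2
        (by rw [hiN, List.length_drop]; simp at hidxlt ⊢; omega)
        hA3 hA4 hpos'

-- non-positive threshold: A always returns 0 (the window is emptied at every step)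
theorem loopA_nonpos (sd : List Int) (T : Int) (hT : T ≤ 0) :
    ∀ (R : List Int) (fuel : Nat) (jn : Nat),
      R.length < fuel → sd.drop jn = R →
      loopA sd T fuel (jn : Int) (jn : Int) PySem.Dict.empty 0 = 0 := by
  intro R
  induction R with
  | nil =>
    intro fuel jn hfuel hdropj
    obtain ⟨f, rfl⟩ : ∃ f, fuel = f + 1 := ⟨fuel - 1, by omega⟩
    have hj : ¬ ((jn : Int) < (sd.length : Int)) := by
      have := List.drop_eq_nil_iff.mp hdropj
      omega
    rw [loopA, if_neg hj]
  | cons r R' ihR =>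
    intro fuel jn hfuel hdropj
    obtain ⟨f, rfl⟩ : ∃ f, fuel = f + 1 := ⟨fuel - 1, by omega⟩
    have hjlt : jn < sd.length := by
      by_contra h
      rw [List.drop_eq_nil_of_le (by omega)] at hdropj
      exact absurd hdropj (by simp)
    have hj : ((jn : Int) < (sd.length : Int)) := by exact_mod_cast hjlt
    have hx : (PySem.List.pyGet? sd (jn : Int)).getD 0 = r := by
      rw [PySem.List.pyGet?_natCast]
      have : sd[jn]? = (sd.drop jn)[0]? := by rw [List.getElem?_drop]; simp
      rw [this, hdropj]; rfl
    have hd1 : (if (PySem.Dict.empty : PySem.Dict Int Int).contains r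
          then (PySem.Dict.empty : PySem.Dict Int Int).insert r ((PySem.Dict.empty : PySem.Dict Int Int).getD r 0 + 1)
          else (PySem.Dict.empty : PySem.Dict Int Int).insert r 1) = PySem.Dict.mk [(r, 1)] := by
      simp [PySem.Dict.contains, PySem.Dict.empty, PySem.Dict.insert]
    obtain ⟨m, hm⟩ : ∃ m, sd.length = m + 1 := ⟨sd.length - 1, by omega⟩
    have hinner : innerA sd T (sd.length + 1) (jn : Int) (PySem.Dict.mk [(r, 1)])
        = (((jn : Nat) : Int) + 1, PySem.Dict.empty) := by
      have hc1 : (PySem.Dict.mk [(r, 1)]).values.any (fun v => decide (v > T)) = true := by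
        simp [PySem.Dict.values_mk]; omega
      have hg : (PySem.Dict.mk [(r, 1)] : PySem.Dict Int Int).getD r 0 = 1 := by
        simp [PySem.Dict.getD, PySem.Dict.get?]
      have hd2 : ((PySem.Dict.mk [(r, 1)]).insert r ((0:Int))).erase r = PySem.Dict.empty := by
        simp [PySem.Dict.insert, PySem.Dict.contains, PySem.Dict.erase, PySem.Dict.empty]
      rw [hm, innerA, if_pos hc1]
      show innerA sd T (m + 1) ((jn : Int) + 1)
          (if ((PySem.Dict.mk [(r, 1)]).getD ((PySem.List.pyGet? sd (jn : Int)).getD 0) 0 - 1 == 0) = true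
           then ((PySem.Dict.mk [(r, 1)]).insert ((PySem.List.pyGet? sd (jn : Int)).getD 0)
                  ((PySem.Dict.mk [(r, 1)]).getD ((PySem.List.pyGet? sd (jn : Int)).getD 0) 0 - 1)).erase
                  ((PySem.List.pyGet? sd (jn : Int)).getD 0)
           else (PySem.Dict.mk [(r, 1)]).insert ((PySem.List.pyGet? sd (jn : Int)).getD 0)
                  ((PySem.Dict.mk [(r, 1)]).getD ((PySem.List.pyGet? sd (jn : Int)).getD 0) 0 - 1)) = _
      rw [hx, hg]
      norm_num [hd2]
      rw [innerA]
      rfl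
    rw [loopA, if_pos hj]
    have hcast : ((jn : Int) + 1) = (((jn + 1 : Nat) : Int)) := by push_cast; ring
    have hmax : max (0 : Int) ((jn : Int) - (((jn + 1 : Nat) : Int)) + 1) = 0 := by push_cast; omega
    simp only [hx, hd1, hinner, hcast, hmax]
    apply ihR f (jn + 1) (by simp at hfuel; omega)
    rw [← List.drop_drop, hdropj]; rfl

-- ===== VERDICT (by name: the statement is the Claim_ definition above) =====
theorem solution_spec : Claim_equal_solution := by
  intro sd T _hdom
  unfold Spec_solution solution solution_alt
  by_cases hT : T ≤ 0
  · rw [if_pos hT]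
    have := loopA_nonpos sd T hT sd (sd.length + 1) 0 (by simp) (by rfl)
    simpa using this
  · rw [if_neg hT]
    have := outer_agree sd T (by omega) sd (sd.length + 1) 0 0 PySem.Dict.empty PySem.Dict.empty 0 []
      (by simp) rfl le_rfl (by simp) (by simp) (by simp)
      ⟨by simp [PySem.Dict.keys_empty], fun k => by simp [PySem.Dict.get?_empty]⟩
      (fun k => by simp; omega)
      (fun y => by simp [PySem.Dict.getD_empty, occs])
    simpa using this
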